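-- pv_equiv track=rewrite | github.com/lequanghung17/Maximum-Clique-Problem | MCP_IS.py | greedy_clique_lb
-- ===== SOURCE A (Python) =====
-- def greedy_clique_lb(n, edges):
--    adj = [set() for _ in range(n + 1)]
--    for u, v in edges:
--       adj[u].add(v)
--       adj[v].add(u)
--    best = 0
--    for s in range(1, n + 1):
--       C = [s]
--       for v in range(1, n + 1):
--          if v not in C and all(v in adj[u] for u in C):
--             C.append(v)
--       best = max(best, len(C))
--    return best
-- ===== SOURCE B (Python) =====
-- def greedy_clique_lb(n, edges):
--     adj = [set() for _ in range(n + 1)]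
--     for u, v in edges:
--         adj[u].add(v)
--         adj[v].add(u)
--     vertices = set(range(1, n + 1))
--     best = 0
--     for s in range(1, n + 1):
--         # grow the clique from s: keep the candidate set (common neighbours of
--         # the clique so far) incrementally and always absorb its smallest
--         # member, instead of rescanning the whole clique for every vertex
--         size = 1
--         cand = (adj[s] & vertices) - {s}
--         while cand:
--             v = min(cand)
--             size += 1
--             cand = cand & adj[v]
--             cand.discard(v)
--         best = max(best, size)
--     return best
-- ===== Notes on version B (the rewrite author's own statement) =====
-- stated objective: faster
-- what changed: Per start vertex, B maintains the candidate set (common neighbours of the clique built so far) incrementally by set intersection and repeatedly absorbs its minimum, tracking only the clique size, instead of scanning all n vertices and rescanning the whole clique with all(v in adj[u] for u in C) for each one.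
import Mathlib
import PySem

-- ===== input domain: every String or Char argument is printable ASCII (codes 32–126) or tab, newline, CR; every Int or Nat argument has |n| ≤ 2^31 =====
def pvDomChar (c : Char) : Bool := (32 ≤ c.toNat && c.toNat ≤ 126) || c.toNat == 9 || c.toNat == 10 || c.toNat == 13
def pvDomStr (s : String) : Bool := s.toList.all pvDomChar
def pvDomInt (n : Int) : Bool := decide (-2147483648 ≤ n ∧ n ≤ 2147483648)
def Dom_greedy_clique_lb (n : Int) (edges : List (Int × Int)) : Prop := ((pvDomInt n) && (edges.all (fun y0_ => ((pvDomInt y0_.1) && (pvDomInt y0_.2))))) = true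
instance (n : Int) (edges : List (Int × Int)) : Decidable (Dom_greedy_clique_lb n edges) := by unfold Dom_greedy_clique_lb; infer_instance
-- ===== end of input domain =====

-- B replaces A's per-candidate rescan of the whole clique by an incrementally
-- maintained common-neighbour candidate set (objective: faster; same results).

-- B replaces A's per-candidate rescan of the whole clique by an incrementally
-- maintained common-neighbour candidate set whose minimum is absorbed in turn
-- (objective: faster; same results).

-- ===== PORT A =====
-- adj[i].add(x): Python list element update with Python index semantics (pySetD/pyGet?;
-- exact for in-range indices, which Pre_ guarantees during adjacency building)
def pvAdjAdd (adj : List (PySem.Set Int)) (i x : Int) : List (PySem.Set Int) :=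
  PySem.List.pySetD adj i (PySem.Set.add ((PySem.List.pyGet? adj i).getD PySem.Set.empty) x)

-- adj = [set() for _ in range(n+1)]; for u, v in edges: adj[u].add(v); adj[v].add(u)
def pvBuildAdj (n : Int) (edges : List (Int × Int)) : List (PySem.Set Int) :=
  edges.foldl (fun adj uv => pvAdjAdd (pvAdjAdd adj uv.1 uv.2) uv.2 uv.1)
    ((PySem.List.pyRange 0 (n + 1) 1).map (fun _ => PySem.Set.empty))

-- adj[i] (read access; exact for the in-range indices 1..n both loops use)
def pvAdjAt (adj : List (PySem.Set Int)) (i : Int) : PySem.Set Int :=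
  (PySem.List.pyGet? adj i).getD PySem.Set.empty

-- for v in range(1, n+1): if v not in C and all(v in adj[u] for u in C): C.append(v)
def pvGrowA (adj : List (PySem.Set Int)) (C : List Int) (vs : List Int) : List Int :=
  match vs with
  | [] => C
  | v :: rest =>
      if ¬ v ∈ C ∧ ∀ u ∈ C, v ∈ pvAdjAt adj u then pvGrowA adj (C ++ [v]) rest
      else pvGrowA adj C rest

def greedy_clique_lb (n : Int) (edges : List (Int × Int)) : Int :=
  let adj := pvBuildAdj n edges
  (PySem.List.pyRange 1 (n + 1) 1).foldl
    (fun best s => max best ((pvGrowA adj [s] (PySem.List.pyRange 1 (n + 1) 1)).length : Int)) 0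

-- ===== PORT B =====
-- termination of B's while loop: the absorbed minimum leaves the candidate set
lemma pvShrink (cand t : PySem.Set Int) (v : Int) (hv : v ∈ cand) :
    (PySem.Set.discard (PySem.Set.inter cand t) v).length < cand.length := by
  have hsub : List.Sublist (PySem.Set.discard (PySem.Set.inter cand t) v) cand :=
    List.Sublist.trans List.filter_sublist List.filter_sublist
  rcases lt_or_eq_of_le hsub.length_le with h | h
  · exact h
  · exact absurd ((hsub.eq_of_length h) ▸ hv)
      (by simp [PySem.Set.mem_discard])

-- while cand: v = min(cand); size += 1; cand = cand & adj[v]; cand.discard(v)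
-- ('while cand' + 'min(cand)' fused: min? cand = none exactly when cand is empty;
--  min over a set with no key is iteration-order independent)
def pvGrowB (adj : List (PySem.Set Int)) (cand : PySem.Set Int) (size : Int) : Int :=
  match h : PySem.List.min? cand (fun x => x) with
  | none => size
  | some v =>
      pvGrowB adj (PySem.Set.discard (PySem.Set.inter cand (pvAdjAt adj v)) v) (size + 1)
termination_by cand.length
decreasing_by exact pvShrink cand _ v (PySem.List.min?_mem h)

def greedy_clique_lb_alt (n : Int) (edges : List (Int × Int)) : Int :=
  let adj := pvBuildAdj n edges
  let vertices : PySem.Set Int := PySem.Set.ofList (PySem.List.pyRange 1 (n + 1) 1)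
  (PySem.List.pyRange 1 (n + 1) 1).foldl
    (fun best s =>
      max best (pvGrowB adj
        (PySem.Set.diff (PySem.Set.inter (pvAdjAt adj s) vertices) (PySem.Set.ofList [s])) 1)) 0

-- ===== PRECONDITION & SPEC =====
-- Pre_ holds exactly when every edge endpoint is a valid Python index into the
-- adjacency list of length n+1 (negative endpoints down to -(n+1) wrap, as in Python);
-- outside it A raises IndexError.
def Pre_greedy_clique_lb (n : Int) (edges : List (Int × Int)) : Prop :=
  ∀ p ∈ edges, -(n + 1) ≤ p.1 ∧ p.1 ≤ n ∧ -(n + 1) ≤ p.2 ∧ p.2 ≤ n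

instance (n : Int) (edges : List (Int × Int)) : Decidable (Pre_greedy_clique_lb n edges) := by
  unfold Pre_greedy_clique_lb; infer_instance

def pvWitness_greedy_clique_lb : Int × (List (Int × Int)) := (4, [(1, 2), (2, 3), (1, 3), (3, 4)])

def Spec_greedy_clique_lb (n : Int) (edges : List (Int × Int)) (out : Int) : Prop := out = greedy_clique_lb_alt n edges
instance (n : Int) (edges : List (Int × Int)) (out : Int) : Decidable (Spec_greedy_clique_lb n edges out) := by unfold Spec_greedy_clique_lb; infer_instance

-- ===== CLAIM (what is proved, stated in full; the proofs are below) =====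
def Claim_equal_greedy_clique_lb : Prop := ∀ (n : Int) (edges : List (Int × Int)), Dom_greedy_clique_lb n edges → Pre_greedy_clique_lb n edges → Spec_greedy_clique_lb n edges (greedy_clique_lb n edges)

-- ===== LEMMAS AND PROOFS =====

-- Loop invariant: cand is exactly the set of common neighbours (among the vertices A
-- has not yet scanned) of the clique C built so far, and size is |C|; then B's
-- absorb-the-minimum loop returns the length of A's grown clique.
lemma pvGrow_eq (adj : List (PySem.Set Int)) (vs : List Int) (hvs : vs.Pairwise (· < ·)) :
    ∀ (C : List Int) (cand : PySem.Set Int),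
      (∀ w ∈ cand, w ∈ vs) →
      (∀ v ∈ vs, (v ∈ cand ↔ (v ∉ C ∧ ∀ u ∈ C, v ∈ pvAdjAt adj u))) →
      pvGrowB adj cand (C.length : Int) = ((pvGrowA adj C vs).length : Int) := by
  induction vs with
  | nil =>
      intro C cand hsub _
      have hc : cand = [] := List.eq_nil_iff_forall_not_mem.mpr
        (fun w hw => absurd (hsub w hw) List.not_mem_nil)
      subst hc
      rw [pvGrowB]
      simp [pvGrowA, PySem.List.min?]
  | cons v rest ih =>
      intro C cand hsub hiff
      have hpw : rest.Pairwise (· < ·) := hvs.tail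
      have hlt : ∀ w ∈ rest, v < w := fun w hw => (List.pairwise_cons.mp hvs).1 w hw
      by_cases hvc : v ∈ cand
      · -- v joins the clique; it is the minimum of cand
        have hmin : PySem.List.min? cand (fun x => x) = some v := by
          cases hm : PySem.List.min? cand (fun x => x) with
          | none => exact absurd ((PySem.List.min?_eq_none_iff cand _).mp hm ▸ hvc) (by simp)
          | some m =>
              have hmem := PySem.List.min?_mem hm
              have hle : m ≤ v := PySem.List.min?_isMin hm v hvc
              rcases List.mem_cons.mp (hsub m hmem) with rfl | h
              · rfl
              · exact absurd (lt_of_lt_of_le (hlt m h) hle) (lt_irrefl v)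
        have hcond : v ∉ C ∧ ∀ u ∈ C, v ∈ pvAdjAt adj u :=
          (hiff v (List.mem_cons_self)).mp hvc
        rw [pvGrowA, if_pos hcond, pvGrowB]
        split
        · rename_i heq; rw [hmin] at heq; exact absurd heq (by simp)
        · rename_i v' heq
          rw [hmin] at heq
          obtain rfl : v = v' := by injection heq
          have h1 : (C.length : Int) + 1 = ((C ++ [v]).length : Int) := by simp
          rw [h1]
          apply ih hpw
          · intro w hw
            simp only [PySem.Set.mem_discard, PySem.Set.mem_inter] at hw
            rcases List.mem_cons.mp (hsub w hw.1.1) with h | h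
            · exact absurd h hw.2
            · exact h
          · intro v' hv'
            have hv'vs : v' ∈ v :: rest := List.mem_cons_of_mem v hv'
            have hvne : v' ≠ v := ne_of_gt (hlt v' hv')
            simp only [PySem.Set.mem_discard, PySem.Set.mem_inter, hiff v' hv'vs,
              List.mem_append, List.mem_singleton]
            constructor
            · rintro ⟨⟨⟨h1, h2⟩, h3⟩, _⟩
              exact ⟨fun hc => hc.elim h1 hvne, fun u hu => hu.elim (h2 u) (fun e => e ▸ h3)⟩
            · rintro ⟨h1, h2⟩
              exact ⟨⟨⟨fun hc => h1 (Or.inl hc), fun u hu => h2 u (Or.inl hu)⟩,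
                h2 v (Or.inr rfl)⟩, hvne⟩
      · -- v is not a candidate: A skips it, B's state is unchanged
        have hcond : ¬ (v ∉ C ∧ ∀ u ∈ C, v ∈ pvAdjAt adj u) :=
          fun hc => hvc ((hiff v (List.mem_cons_self)).mpr hc)
        rw [pvGrowA, if_neg hcond]
        apply ih hpw
        · intro w hw
          rcases List.mem_cons.mp (hsub w hw) with h | h
          · exact absurd (h ▸ hw) hvc
          · exact h
        · intro v' hv'
          exact hiff v' (List.mem_cons_of_mem v hv')

-- one start vertex: B's initial candidate set matches A's condition for C = [s]
lemma pvStart_eq (adj : List (PySem.Set Int)) (n s : Int) :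
    pvGrowB adj
      (PySem.Set.diff (PySem.Set.inter (pvAdjAt adj s)
        (PySem.Set.ofList (PySem.List.pyRange 1 (n + 1) 1))) (PySem.Set.ofList [s])) 1
      = ((pvGrowA adj [s] (PySem.List.pyRange 1 (n + 1) 1)).length : Int) := by
  have h := pvGrow_eq adj (PySem.List.pyRange 1 (n + 1) 1)
    (PySem.List.pairwise_lt_pyRange_one 1 (n + 1)) [s]
    (PySem.Set.diff (PySem.Set.inter (pvAdjAt adj s)
      (PySem.Set.ofList (PySem.List.pyRange 1 (n + 1) 1))) (PySem.Set.ofList [s])) ?_ ?_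
  · simpa using h
  · intro w hw
    simp only [PySem.Set.mem_diff, PySem.Set.mem_inter, PySem.Set.mem_ofList] at hw
    exact hw.1.2
  · intro v hv
    simp only [PySem.Set.mem_diff, PySem.Set.mem_inter, PySem.Set.mem_ofList,
      List.mem_singleton]
    constructor
    · rintro ⟨⟨h1, _⟩, h2⟩
      exact ⟨h2, fun u e => e ▸ h1⟩
    · rintro ⟨h1, h2⟩
      exact ⟨⟨h2 s rfl, hv⟩, h1⟩

-- ===== VERDICT (by name: the statement is the Claim_ definition above) =====
theorem greedy_clique_lb_spec : Claim_equal_greedy_clique_lb := by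
  intro n edges _ _
  unfold Spec_greedy_clique_lb greedy_clique_lb greedy_clique_lb_alt
  apply List.foldl_ext
  intro best s _
  rw [pvStart_eq]
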